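-- pv_equiv track=rewrite | github.com/BrettRey/erdos-problem-993 | conjecture_a_mode_tie_leaf_bridge_scan.py | choose_leaf_parent_deg2_else_max
-- ===== SOURCE A (Python) =====
-- def choose_leaf_parent_deg2_else_max(
--     leaves: list[int],
--     parent: dict[int, int],
--     deg: list[int],
-- ) -> int:
--     cand = [l for l in leaves if deg[parent[l]] == 2]
--     if cand:
--         return min(cand)
--     best_deg = max(deg[parent[l]] for l in leaves)
--     return min(l for l in leaves if deg[parent[l]] == best_deg)
-- ===== SOURCE B (Python) =====
-- def choose_leaf_parent_deg2_else_max(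
--     leaves: list[int],
--     parent: dict[int, int],
--     deg: list[int],
-- ) -> int:
--     # sort once, then one scan with early exit: the first deg-2-parent leaf in
--     # ascending order is min(cand); otherwise the first leaf carrying a strictly
--     # new maximal parent degree is the smallest leaf of maximal parent degree.
--     ordered = sorted(leaves)
--     best = ordered[0]
--     for l in ordered:
--         d = deg[parent[l]]
--         if d == 2:
--             return l
--         if d > deg[parent[best]]:
--             best = l
--     return best
-- ===== Notes on version B (the rewrite author's own statement) =====
-- stated objective: alternative
-- what changed: Replaces A's branch with three list passes (filter, max, filter+min) by sort-then-single-scan: sort the leaves once, return the first deg-2-parent leaf encountered, else track the first leaf attaining a strictly larger parent degree.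
import Mathlib
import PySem

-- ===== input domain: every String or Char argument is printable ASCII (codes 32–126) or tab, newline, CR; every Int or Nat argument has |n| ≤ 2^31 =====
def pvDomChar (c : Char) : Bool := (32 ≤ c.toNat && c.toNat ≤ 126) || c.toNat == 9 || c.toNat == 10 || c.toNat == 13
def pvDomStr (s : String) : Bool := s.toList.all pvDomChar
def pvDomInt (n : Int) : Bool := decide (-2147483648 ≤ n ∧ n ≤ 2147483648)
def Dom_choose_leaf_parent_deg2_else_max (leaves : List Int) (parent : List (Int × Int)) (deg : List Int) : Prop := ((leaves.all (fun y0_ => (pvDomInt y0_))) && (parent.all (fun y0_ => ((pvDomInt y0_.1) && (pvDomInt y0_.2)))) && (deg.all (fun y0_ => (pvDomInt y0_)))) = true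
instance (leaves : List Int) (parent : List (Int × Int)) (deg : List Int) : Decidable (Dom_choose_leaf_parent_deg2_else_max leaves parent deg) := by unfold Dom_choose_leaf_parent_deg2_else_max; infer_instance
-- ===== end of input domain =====

-- B sorts the leaves once and makes one early-exit scan instead of A's branch with three passes; return value only.

-- deg[parent[l]], total under Pre_ (lookup succeeds, index in Python range)
def pvDeg (parent : List (Int × Int)) (deg : List Int) (l : Int) : Int :=
  PySem.List.pyGetD deg (PySem.Dict.getD (PySem.Dict.mk parent) l 0) 0

-- ===== PORT A =====
def choose_leaf_parent_deg2_else_max (leaves : List Int) (parent : List (Int × Int)) (deg : List Int) : Int :=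
  let cand := leaves.filter (fun l => pvDeg parent deg l == 2)
  if cand.isEmpty then
    let best_deg := (PySem.List.max? (leaves.map (fun l => pvDeg parent deg l)) (fun x => x)).getD 0
    (PySem.List.min? (leaves.filter (fun l => pvDeg parent deg l == best_deg)) (fun x => x)).getD 0
  else
    (PySem.List.min? cand (fun x => x)).getD 0

-- ===== PORT B =====
-- Source B's for-loop: early return on a deg-2 parent, else keep the first leaf with a strictly larger parent degree
def pvAltScan (parent : List (Int × Int)) (deg : List Int) : List Int → Int → Int
  | [], best => best
  | l :: t, best =>
    if pvDeg parent deg l == 2 then l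
    else if pvDeg parent deg l > pvDeg parent deg best then pvAltScan parent deg t l
    else pvAltScan parent deg t best

def choose_leaf_parent_deg2_else_max_alt (leaves : List Int) (parent : List (Int × Int)) (deg : List Int) : Int :=
  match PySem.List.sorted leaves (fun x => x) false with
  | [] => 0   -- ordered[0] raises on empty input (outside Pre_)
  | b0 :: rest => pvAltScan parent deg (b0 :: rest) b0

-- ===== PRECONDITION & SPEC =====
-- Pre_ excludes exactly the inputs where A raises: empty leaves (ValueError from min/max),
-- a leaf missing from parent (KeyError), or a parent index outside Python range (IndexError).
def Pre_choose_leaf_parent_deg2_else_max (leaves : List Int) (parent : List (Int × Int)) (deg : List Int) : Prop :=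
  leaves ≠ [] ∧
  leaves.all (fun l => ((PySem.Dict.get? (PySem.Dict.mk parent) l).map (fun p => decide (PySem.Raise.InRange deg.length p))).getD false) = true
instance (leaves : List Int) (parent : List (Int × Int)) (deg : List Int) : Decidable (Pre_choose_leaf_parent_deg2_else_max leaves parent deg) := by unfold Pre_choose_leaf_parent_deg2_else_max; infer_instance

def pvWitness_choose_leaf_parent_deg2_else_max : List Int × (List (Int × Int)) × List Int :=
  ([3, 1], [(3, 0), (1, 1)], [2, 3])

def Spec_choose_leaf_parent_deg2_else_max (leaves : List Int) (parent : List (Int × Int)) (deg : List Int) (out : Int) : Prop := out = choose_leaf_parent_deg2_else_max_alt leaves parent deg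
instance (leaves : List Int) (parent : List (Int × Int)) (deg : List Int) (out : Int) : Decidable (Spec_choose_leaf_parent_deg2_else_max leaves parent deg out) := by unfold Spec_choose_leaf_parent_deg2_else_max; infer_instance

-- ===== CLAIM (what is proved, stated in full; the proofs are below) =====
def Claim_equal_choose_leaf_parent_deg2_else_max : Prop := ∀ (leaves : List Int) (parent : List (Int × Int)) (deg : List Int), Dom_choose_leaf_parent_deg2_else_max leaves parent deg → Pre_choose_leaf_parent_deg2_else_max leaves parent deg → Spec_choose_leaf_parent_deg2_else_max leaves parent deg (choose_leaf_parent_deg2_else_max leaves parent deg)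

-- ===== LEMMAS AND PROOFS =====

-- A's selection priority as one lexicographic key: (is-deg-2-parent, -parent-degree, leaf)
def pvKey (parent : List (Int × Int)) (deg : List Int) (l : Int) : Int × Int × Int :=
  (if pvDeg parent deg l = 2 then 0 else 1, -(pvDeg parent deg l), l)

-- lexicographic < on triples of ints
def pvLexLt (a b : Int × Int × Int) : Bool :=
  a.1 < b.1 || (a.1 == b.1 && (a.2.1 < b.2.1 || (a.2.1 == b.2.1 && a.2.2 < b.2.2)))

theorem pvLexLt_iff (a b : Int × Int × Int) :
    pvLexLt a b = true ↔ (a.1 < b.1 ∨ (a.1 = b.1 ∧ (a.2.1 < b.2.1 ∨ (a.2.1 = b.2.1 ∧ a.2.2 < b.2.2)))) := by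
  simp [pvLexLt]

theorem pvLexLt_trans_false (a b c : Int × Int × Int)
    (h1 : pvLexLt a b = false) (h2 : pvLexLt b c = false) : pvLexLt a c = false := by
  rcases a with ⟨a1, a2, a3⟩; rcases b with ⟨b1, b2, b3⟩; rcases c with ⟨c1, c2, c3⟩
  simp [pvLexLt] at h1 h2 ⊢
  omega

-- B's scan returns a member of b :: s whose key is lex-minimal over b :: s
theorem scan_min (parent : List (Int × Int)) (deg : List Int) :
    ∀ (s : List Int), s.Pairwise (· ≤ ·) → ∀ b : Int, pvDeg parent deg b ≠ 2 → (∀ y ∈ s, b ≤ y) →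
      pvAltScan parent deg s b ∈ b :: s ∧
      ∀ y ∈ b :: s, pvLexLt (pvKey parent deg y) (pvKey parent deg (pvAltScan parent deg s b)) = false := by
  intro s
  induction s with
  | nil =>
      intro _ b hb _
      refine ⟨by simp [pvAltScan], ?_⟩
      intro y hy
      simp at hy; subst hy
      simp only [pvAltScan]
      rw [Bool.eq_false_iff]; intro h
      rw [pvLexLt_iff] at h; simp only [pvKey] at h; omega
  | cons l t ih =>
      intro hpw b hb hble
      have hlt : ∀ y ∈ t, l ≤ y := by
        intro y hy; exact (List.pairwise_cons.mp hpw).1 y hy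
      have htpw : t.Pairwise (· ≤ ·) := (List.pairwise_cons.mp hpw).2
      have hbl : b ≤ l := hble l (by simp)
      by_cases h2 : pvDeg parent deg l = 2
      · have hres : pvAltScan parent deg (l :: t) b = l := by simp [pvAltScan, h2]
        rw [hres]
        refine ⟨by simp, ?_⟩
        intro y hy
        rw [Bool.eq_false_iff]; intro h
        rw [pvLexLt_iff] at h; simp only [pvKey] at h
        rcases List.mem_cons.mp hy with h1 | h1
        · subst h1; split_ifs at h <;> omega
        · rcases List.mem_cons.mp h1 with h1 | h1
          · subst h1; split_ifs at h <;> omega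
          · have := hlt y h1; split_ifs at h <;> omega
      · set b' := if pvDeg parent deg l > pvDeg parent deg b then l else b with hb'
        have hres : pvAltScan parent deg (l :: t) b = pvAltScan parent deg t b' := by
          simp only [pvAltScan, hb']
          split_ifs with hc1 hc2 <;> simp_all
        have hb'2 : pvDeg parent deg b' ≠ 2 := by
          rw [hb']; split_ifs <;> assumption
        have hb'le : ∀ y ∈ t, b' ≤ y := by
          intro y hy; rw [hb']; split_ifs
          · exact hlt y hy
          · exact hble y (by simp [hy])
        obtain ⟨hmem, hmin⟩ := ih htpw b' hb'2 hb'le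
        rw [hres]
        set r := pvAltScan parent deg t b' with hr
        constructor
        · rcases List.mem_cons.mp hmem with h1 | h1
          · rw [h1, hb']; split_ifs <;> simp
          · simp [h1]
        · -- both b and l are not lex-below b'
          have hkb' : pvLexLt (pvKey parent deg b) (pvKey parent deg b') = false ∧
                      pvLexLt (pvKey parent deg l) (pvKey parent deg b') = false := by
            constructor <;>
            · rw [Bool.eq_false_iff]; intro h
              rw [pvLexLt_iff] at h; simp only [pvKey, hb'] at h
              split_ifs at h <;> omega
          have hb'r : pvLexLt (pvKey parent deg b') (pvKey parent deg r) = false := hmin b' (by simp)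
          intro y hy
          rcases List.mem_cons.mp hy with h1 | h1
          · subst h1; exact pvLexLt_trans_false _ _ _ hkb'.1 hb'r
          · rcases List.mem_cons.mp h1 with h1 | h1
            · subst h1; exact pvLexLt_trans_false _ _ _ hkb'.2 hb'r
            · exact hmin y (by simp [h1])

-- uniqueness: a member whose key is lex-minimal over leaves is determined (the key contains the leaf itself)
theorem min_unique (parent : List (Int × Int)) (deg : List Int) (leaves : List Int) (m1 m2 : Int)
    (h1 : m1 ∈ leaves) (h2 : m2 ∈ leaves)
    (hm1 : ∀ y ∈ leaves, pvLexLt (pvKey parent deg y) (pvKey parent deg m1) = false)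
    (hm2 : ∀ y ∈ leaves, pvLexLt (pvKey parent deg y) (pvKey parent deg m2) = false) :
    m1 = m2 := by
  have a1 : ¬ (pvLexLt (pvKey parent deg m2) (pvKey parent deg m1) = true) := by simp [hm1 m2 h2]
  have a2 : ¬ (pvLexLt (pvKey parent deg m1) (pvKey parent deg m2) = true) := by simp [hm2 m1 h1]
  rw [pvLexLt_iff] at a1 a2
  simp only [pvKey] at a1 a2
  split_ifs at a1 a2 <;> omega

-- A's result is a member with lex-minimal key
theorem a_min (leaves : List Int) (parent : List (Int × Int)) (deg : List Int) (hne : leaves ≠ []) :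
    choose_leaf_parent_deg2_else_max leaves parent deg ∈ leaves ∧
    ∀ y ∈ leaves,
      pvLexLt (pvKey parent deg y) (pvKey parent deg (choose_leaf_parent_deg2_else_max leaves parent deg)) = false := by
  unfold choose_leaf_parent_deg2_else_max
  set cand := leaves.filter (fun l => pvDeg parent deg l == 2) with hcand
  by_cases hc : cand.isEmpty
  · rw [if_pos hc]
    have hcnil : cand = [] := List.isEmpty_iff.mp hc
    have hno2 : ∀ y ∈ leaves, pvDeg parent deg y ≠ 2 := by
      intro y hy h2
      have : y ∈ cand := by rw [hcand]; exact List.mem_filter.mpr ⟨hy, by simp [h2]⟩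
      simp [hcnil] at this
    set best := (PySem.List.max? (leaves.map (fun l => pvDeg parent deg l)) (fun x => x)).getD 0 with hbest
    obtain ⟨mx, hmx⟩ : ∃ mx, PySem.List.max? (leaves.map (fun l => pvDeg parent deg l)) (fun x => x) = some mx := by
      cases hm : PySem.List.max? (leaves.map (fun l => pvDeg parent deg l)) (fun x => x) with
      | none => exact absurd (by simpa using (PySem.List.max?_eq_none_iff _ _).mp hm) hne
      | some v => exact ⟨v, rfl⟩
    have hbmx : best = mx := by rw [hbest, hmx]; rfl
    have hmxmem := PySem.List.max?_mem hmx
    have hmxmax := PySem.List.max?_isMax hmx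
    obtain ⟨l0, hl0, hl0d⟩ := List.mem_map.mp hmxmem
    have hfne : leaves.filter (fun l => pvDeg parent deg l == best) ≠ [] := by
      intro hnil
      have : l0 ∈ leaves.filter (fun l => pvDeg parent deg l == best) :=
        List.mem_filter.mpr ⟨hl0, by simp [hl0d, hbmx]⟩
      simp [hnil] at this
    obtain ⟨m, hm⟩ : ∃ m, PySem.List.min? (leaves.filter (fun l => pvDeg parent deg l == best)) (fun x => x) = some m := by
      cases hmm : PySem.List.min? (leaves.filter (fun l => pvDeg parent deg l == best)) (fun x => x) with
      | none => exact absurd ((PySem.List.min?_eq_none_iff _ _).mp hmm) hfne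
      | some v => exact ⟨v, rfl⟩
    simp only [hm, Option.getD_some]
    have hmmem := PySem.List.min?_mem hm
    have hmmin := PySem.List.min?_isMin hm
    obtain ⟨hmleaves, hmdeg⟩ := List.mem_filter.mp hmmem
    have hmdeg' : pvDeg parent deg m = best := by simpa using hmdeg
    refine ⟨hmleaves, ?_⟩
    intro y hy
    have hyle : pvDeg parent deg y ≤ best := by
      rw [hbmx]
      exact hmxmax _ (List.mem_map.mpr ⟨y, hy, rfl⟩)
    by_contra hlt
    rw [Bool.not_eq_false, pvLexLt_iff] at hlt
    simp only [pvKey] at hlt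
    have hy2 := hno2 y hy
    have hm2 := hno2 m hmleaves
    by_cases hyb : pvDeg parent deg y = best
    · have hym : y ∈ leaves.filter (fun l => pvDeg parent deg l == best) :=
        List.mem_filter.mpr ⟨hy, by simp [hyb]⟩
      have := hmmin y hym
      split_ifs at hlt <;> omega
    · split_ifs at hlt <;> omega
  · rw [if_neg hc]
    have hcne : cand ≠ [] := fun h => hc (by simp [h])
    obtain ⟨m, hm⟩ : ∃ m, PySem.List.min? cand (fun x => x) = some m := by
      cases hmm : PySem.List.min? cand (fun x => x) with
      | none => exact absurd ((PySem.List.min?_eq_none_iff _ _).mp hmm) hcne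
      | some v => exact ⟨v, rfl⟩
    simp only [hm, Option.getD_some]
    have hmmem := PySem.List.min?_mem hm
    have hmmin := PySem.List.min?_isMin hm
    obtain ⟨hmleaves, hmdeg⟩ := List.mem_filter.mp (hcand ▸ hmmem)
    have hm2 : pvDeg parent deg m = 2 := by simpa using hmdeg
    refine ⟨hmleaves, ?_⟩
    intro y hy
    by_contra hlt
    rw [Bool.not_eq_false, pvLexLt_iff] at hlt
    simp only [pvKey] at hlt
    by_cases hy2 : pvDeg parent deg y = 2
    · have hym : y ∈ cand := by rw [hcand]; exact List.mem_filter.mpr ⟨hy, by simp [hy2]⟩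
      have := hmmin y hym
      split_ifs at hlt <;> omega
    · split_ifs at hlt <;> omega

-- B's result is a member with lex-minimal key
theorem alt_min (leaves : List Int) (parent : List (Int × Int)) (deg : List Int) (hne : leaves ≠ []) :
    choose_leaf_parent_deg2_else_max_alt leaves parent deg ∈ leaves ∧
    ∀ y ∈ leaves,
      pvLexLt (pvKey parent deg y) (pvKey parent deg (choose_leaf_parent_deg2_else_max_alt leaves parent deg)) = false := by
  unfold choose_leaf_parent_deg2_else_max_alt
  cases hord : PySem.List.sorted leaves (fun x => x) false with
  | nil => exact absurd ((PySem.List.sorted_eq_nil_iff _ _ _).mp hord) hne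
  | cons b0 rest =>
      dsimp only
      have hhead : ∀ y ∈ leaves, b0 ≤ y := PySem.List.key_head_sorted_le leaves (fun x => x) hord
      have hperm : (b0 :: rest).Perm leaves := hord ▸ PySem.List.sorted_perm leaves (fun x => x) false
      have hmemiff : ∀ y, y ∈ b0 :: rest ↔ y ∈ leaves := fun y => hperm.mem_iff
      have hpw : (b0 :: rest).Pairwise (· ≤ ·) := by
        rw [← hord]; exact PySem.List.sorted_pairwise leaves (fun x => x)
      by_cases h2 : pvDeg parent deg b0 = 2
      · have hres : pvAltScan parent deg (b0 :: rest) b0 = b0 := by simp [pvAltScan, h2]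
        rw [hres]
        refine ⟨(hmemiff b0).mp (by simp), ?_⟩
        intro y hy
        have := hhead y hy
        rw [Bool.eq_false_iff]; intro h
        rw [pvLexLt_iff] at h; simp only [pvKey] at h
        split_ifs at h <;> omega
      · have hle : ∀ y ∈ b0 :: rest, b0 ≤ y := fun y hy => hhead y ((hmemiff y).mp hy)
        obtain ⟨hmem, hmin⟩ := scan_min parent deg (b0 :: rest) hpw b0 h2 hle
        constructor
        · rcases List.mem_cons.mp hmem with h1 | h1
          · rw [h1]; exact (hmemiff b0).mp (by simp)
          · exact (hmemiff _).mp h1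
        · intro y hy
          exact hmin y (List.mem_cons_of_mem _ ((hmemiff y).mpr hy))

-- ===== VERDICT (by name: the statement is the Claim_ definition above) =====
theorem choose_leaf_parent_deg2_else_max_spec : Claim_equal_choose_leaf_parent_deg2_else_max := by
  intro leaves parent deg _ hpre
  obtain ⟨hne, _⟩ := hpre
  unfold Spec_choose_leaf_parent_deg2_else_max
  obtain ⟨hamem, hamin⟩ := a_min leaves parent deg hne
  obtain ⟨hbmem, hbmin⟩ := alt_min leaves parent deg hne
  exact min_unique parent deg leaves _ _ hamem hbmem hamin hbmin
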